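-- pv_equiv track=rewrite | github.com/Kamakepar2029/systemdiscover | sixteen.py | F
-- ===== SOURCE A (Python) =====
-- def F(x):
--   if x == 0:
--     l = 1
--   elif x == 1:
--     l = 3
--   elif x ==2:
--     l = 2
--   else:
--     l = F(x-1)*F(x-3)
--   return l
-- ===== SOURCE B (Python) =====
-- def F(x):
--     # Bottom-up: carry the last three values instead of the double recursion.
--     a, b, c = 1, 3, 2  # F(0), F(1), F(2)
--     if x == 0:
--         return a
--     if x == 1:
--         return b
--     if x == 2:
--         return c
--     for _ in range(3, x + 1):
--         a, b, c = b, c, c * a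
--     return c
-- ===== Notes on version B (the rewrite author's own statement) =====
-- stated objective: alternative
-- what changed: Replaces the double recursion F(x-1)*F(x-3) with a bottom-up loop carrying the last three values.
import Mathlib
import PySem

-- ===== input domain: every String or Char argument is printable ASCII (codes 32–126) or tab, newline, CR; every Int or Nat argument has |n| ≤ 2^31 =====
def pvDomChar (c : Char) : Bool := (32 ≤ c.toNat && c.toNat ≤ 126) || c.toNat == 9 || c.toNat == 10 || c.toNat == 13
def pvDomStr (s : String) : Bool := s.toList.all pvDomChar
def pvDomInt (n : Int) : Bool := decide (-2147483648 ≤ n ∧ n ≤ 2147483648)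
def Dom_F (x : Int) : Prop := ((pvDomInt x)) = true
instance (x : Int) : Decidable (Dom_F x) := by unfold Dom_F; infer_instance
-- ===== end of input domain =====

-- B replaces A's double recursion F(x-1)*F(x-3) with a bottom-up loop carrying the last three values (alternative formulation).


-- ===== PORT A =====
-- Literal transliteration of A's recursion; on x < 0 the Python recursion never
-- terminates (RecursionError), so that region is excluded by Pre_F and the port
-- returns 0 there only to be total (the final 'else 0' is a totality guard).
def F (x : Int) : Int :=
  if x == 0 then 1
  else if x == 1 then 3
  else if x == 2 then 2
  else if 3 ≤ x then F (x - 1) * F (x - 3)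
  else 0
termination_by x.toNat
decreasing_by
  all_goals simp_all
  all_goals omega

-- ===== PORT B =====
-- the loop 'for _ in range(3, x+1): a,b,c = b,c,c*a' counted down by iterations left
def altGo : Nat → Int × Int × Int → Int
  | 0, (_, _, c) => c
  | n + 1, (a, b, c) => altGo n (b, c, c * a)

def F_alt (x : Int) : Int :=
  if x == 0 then 1
  else if x == 1 then 3
  else if x == 2 then 2
  else altGo (x - 2).toNat (1, 3, 2)

-- ===== PRECONDITION & SPEC =====
-- Pre_F excludes x < 0, on which the Python A recurses forever (RecursionError).
def Pre_F (x : Int) : Prop := 0 ≤ x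
instance (x : Int) : Decidable (Pre_F x) := by unfold Pre_F; infer_instance
def pvWitness_F : Int := (5)

def Spec_F (x : Int) (out : Int) : Prop := out = F_alt x
instance (x : Int) (out : Int) : Decidable (Spec_F x out) := by unfold Spec_F; infer_instance

-- ===== CLAIM (what is proved, stated in full; the proofs are below) =====
def Claim_equal_F : Prop := ∀ (x : Int), Dom_F x → Pre_F x → Spec_F x (F x)

-- ===== LEMMAS AND PROOFS =====

theorem F_zero : F 0 = 1 := by simp [F]
theorem F_one : F 1 = 3 := by simp [F]
theorem F_two : F 2 = 2 := by simp [F]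

theorem F_rec (x : Int) (hx : 3 ≤ x) : F x = F (x - 1) * F (x - 3) := by
  rw [F]
  have h0 : ¬ (x == 0) = true := by simp; omega
  have h1 : ¬ (x == 1) = true := by simp; omega
  have h2 : ¬ (x == 2) = true := by simp; omega
  simp [h0, h1, h2, hx]

theorem altGo_inv (n : Nat) : ∀ (m : Int), 0 ≤ m →
    altGo n (F m, F (m + 1), F (m + 2)) = F (m + 2 + n) := by
  induction n with
  | zero => intro m _; simp [altGo]
  | succ k ih =>
    intro m hm
    have hrec : F (m + 2) * F m = F (m + 3) := by
      have h := F_rec (m + 3) (by omega)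
      have e1 : m + 3 - 1 = m + 2 := by ring
      have e3 : m + 3 - 3 = m := by ring
      rw [e1, e3] at h
      exact h.symm
    have e1 : m + 2 = (m + 1) + 1 := by ring
    have e2 : m + 3 = (m + 1) + 2 := by ring
    rw [altGo, hrec, e1, e2, ih (m + 1) (by omega)]
    congr 1
    push_cast
    ring

-- ===== VERDICT (by name: the statement is the Claim_ definition above) =====
theorem F_spec : Claim_equal_F := by
  intro x _ hx
  unfold Spec_F F_alt
  by_cases h0 : x = 0
  · subst h0; simp [F_zero]
  by_cases h1 : x = 1
  · subst h1; simp [F_one]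
  by_cases h2 : x = 2
  · subst h2; simp [F_two]
  have hx3 : 3 ≤ x := by unfold Pre_F at hx; omega
  have hb0 : ¬ (x == 0) = true := by simp [h0]
  have hb1 : ¬ (x == 1) = true := by simp [h1]
  have hb2 : ¬ (x == 2) = true := by simp [h2]
  rw [if_neg hb0, if_neg hb1, if_neg hb2]
  rw [show ((1 : Int), (3 : Int), (2 : Int)) = (F 0, F ((0 : Int) + 1), F ((0 : Int) + 2)) from by
    norm_num [F_zero, F_one, F_two]]
  rw [altGo_inv _ 0 (by norm_num)]
  have harg : (0 : Int) + 2 + (((x - 2).toNat : Nat) : Int) = x := by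
    have := Int.toNat_of_nonneg (show (0 : Int) ≤ x - 2 by omega)
    omega
  rw [harg]
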